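-- pv_equiv track=rewrite | github.com/Mubashar228/resume_insight_pro | parser.py | estimate_total_experience
-- ===== SOURCE A (Python) =====
-- def estimate_total_experience(exps):
--     years = []
--     for e in exps:
--         for y in e.get("years", []) if "years" in e else e.get("years_found", []):
--             try:
--                 years.append(int(y))
--             except:
--                 pass
--     if not years:
--         return None
--     return max(years) - min(years)
-- ===== SOURCE B (Python) =====
-- def _to_int(y):
--     try:
--         return int(y)
--     except:
--         return None
--
--
-- def estimate_total_experience(exps):
--     vals = [e.get("years", []) if "years" in e else e.get("years_found", []) for e in exps]
--     ys = sorted(n for v in vals for y in v if (n := _to_int(y)) is not None)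
--     if not ys:
--         return None
--     return ys[-1] - ys[0]
-- ===== Notes on version B (the rewrite author's own statement) =====
-- stated objective: alternative
-- what changed: B stages the computation differently: it first materializes the per-entry value lists, flattens and parses them in a comprehension, sorts the parsed years, and returns last-first of the sorted list instead of A's incremental append loop followed by max/min scans.
import Mathlib
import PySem

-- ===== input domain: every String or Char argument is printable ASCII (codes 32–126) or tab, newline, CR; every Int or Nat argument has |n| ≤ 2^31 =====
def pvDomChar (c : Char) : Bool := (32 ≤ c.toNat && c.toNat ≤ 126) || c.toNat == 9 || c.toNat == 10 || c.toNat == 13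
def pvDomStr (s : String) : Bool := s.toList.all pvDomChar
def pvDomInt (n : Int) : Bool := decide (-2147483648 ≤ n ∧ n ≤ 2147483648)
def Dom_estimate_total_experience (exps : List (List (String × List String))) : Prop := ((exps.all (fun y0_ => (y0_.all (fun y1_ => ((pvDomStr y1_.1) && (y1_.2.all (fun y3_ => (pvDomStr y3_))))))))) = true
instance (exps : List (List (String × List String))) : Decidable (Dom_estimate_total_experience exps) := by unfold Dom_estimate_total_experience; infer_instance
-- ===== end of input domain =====

-- B replaces A's append loop + max/min scans by: stage the per-entry value lists, flatten/parse in a comprehension, sort, and return last - first of the sorted list.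

-- ===== PORT A =====
-- shared by both ports: the Python expression `e.get("years", []) if "years" in e else e.get("years_found", [])`
def pvVals (e : List (String × List String)) : List String :=
  if (PySem.Dict.mk e).contains "years" then (PySem.Dict.mk e).getD "years" []
  else (PySem.Dict.mk e).getD "years_found" []

-- `try: years.append(int(y)) except: pass`
def pvAStep (years : List Int) (y : String) : List Int :=
  match PySem.Int.ofStr? y with
  | some n => years ++ [n]
  | none => years

def estimate_total_experience (exps : List (List (String × List String))) : Option Int :=
  let years := exps.foldl (fun years e => (pvVals e).foldl pvAStep years) []
  if years = [] then none
  else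
    match PySem.List.max? years (fun v => v), PySem.List.min? years (fun v => v) with
    | some mx, some mn => some (mx - mn)
    | _, _ => none

-- ===== PORT B =====
-- B's own copy of `e.get("years", []) if "years" in e else e.get("years_found", [])` (the list-comprehension stage)
def pvBVals (e : List (String × List String)) : List String :=
  if (PySem.Dict.mk e).contains "years" then (PySem.Dict.mk e).getD "years" []
  else (PySem.Dict.mk e).getD "years_found" []

-- `def _to_int(y): try: return int(y) except: return None`
def pvToInt? (y : String) : Option Int := PySem.Int.ofStr? y

def estimate_total_experience_alt (exps : List (List (String × List String))) : Option Int :=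
  let vals := exps.map pvBVals
  let ys := PySem.List.sorted (vals.flatMap (fun v => v.filterMap pvToInt?)) (fun x => x) false
  if ys = [] then none
  else
    match PySem.List.pyGet? ys (-1) with
    | none => none
    | some a =>
        match PySem.List.pyGet? ys 0 with
        | none => none
        | some b => some (a - b)

-- ===== PRECONDITION & SPEC =====
def Spec_estimate_total_experience (exps : List (List (String × List String))) (out : Option Int) : Prop := out = estimate_total_experience_alt exps
instance (exps : List (List (String × List String))) (out : Option Int) : Decidable (Spec_estimate_total_experience exps out) := by unfold Spec_estimate_total_experience; infer_instance

-- ===== CLAIM (what is proved, stated in full; the proofs are below) =====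
def Claim_equal_estimate_total_experience : Prop := ∀ (exps : List (List (String × List String))), Dom_estimate_total_experience exps → Spec_estimate_total_experience exps (estimate_total_experience exps)

-- ===== LEMMAS AND PROOFS =====

theorem pvBVals_eq : pvBVals = pvVals := rfl

-- A's inner append loop builds acc ++ filterMap
theorem pvAStep_foldl (l : List String) (acc : List Int) :
    l.foldl pvAStep acc = acc ++ l.filterMap PySem.Int.ofStr? := by
  induction l generalizing acc with
  | nil => simp
  | cons y t ih =>
      cases h : PySem.Int.ofStr? y <;>
        simp [List.foldl, pvAStep, h, ih]

-- A's whole loop builds exactly the flattened parsed list B stages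
theorem pvA_years (exps : List (List (String × List String))) (acc : List Int) :
    exps.foldl (fun years e => (pvVals e).foldl pvAStep years) acc
      = acc ++ (exps.map pvVals).flatMap (fun v => v.filterMap pvToInt?) := by
  induction exps generalizing acc with
  | nil => simp
  | cons e t ih =>
      rw [List.foldl_cons, ih ((pvVals e).foldl pvAStep acc), pvAStep_foldl]
      simp [pvToInt?, List.append_assoc]

-- the running-min loop computes an element that is minimal
theorem pvFoldlMin_mem (t : List Int) (x : Int) : t.foldl min x ∈ x :: t := by
  induction t generalizing x with
  | nil => simp
  | cons a s ih =>
      have := ih (min x a)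
      rcases List.mem_cons.1 this with h | h
      · rcases le_total x a with hxa | hxa
        · simp_all
        · simp_all
      · simp [List.foldl, List.mem_cons, h]

theorem pvFoldlMin_le (t : List Int) (x : Int) : ∀ y ∈ x :: t, t.foldl min x ≤ y := by
  induction t generalizing x with
  | nil => simp
  | cons a s ih =>
      intro y hy
      have h1 := ih (min x a)
      rcases List.mem_cons.1 hy with rfl | hy
      · exact le_trans (h1 _ (List.mem_cons_self)) (min_le_left _ _)
      · rcases List.mem_cons.1 hy with rfl | hy
        · exact le_trans (h1 _ (List.mem_cons_self)) (min_le_right _ _)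
        · exact h1 _ (List.mem_cons_of_mem _ hy)

theorem pvFoldlMax_mem (t : List Int) (x : Int) : t.foldl max x ∈ x :: t := by
  induction t generalizing x with
  | nil => simp
  | cons a s ih =>
      have := ih (max x a)
      rcases List.mem_cons.1 this with h | h
      · rcases le_total x a with hxa | hxa
        · simp_all
        · simp_all
      · simp [List.foldl, List.mem_cons, h]

theorem pvFoldlMax_ge (t : List Int) (x : Int) : ∀ y ∈ x :: t, y ≤ t.foldl max x := by
  induction t generalizing x with
  | nil => simp
  | cons a s ih =>
      intro y hy
      have h1 := ih (max x a)
      rcases List.mem_cons.1 hy with rfl | hy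
      · exact le_trans (le_max_left _ _) (h1 _ (List.mem_cons_self))
      · rcases List.mem_cons.1 hy with rfl | hy
        · exact le_trans (le_max_right _ _) (h1 _ (List.mem_cons_self))
        · exact h1 _ (List.mem_cons_of_mem _ hy)

-- head of the sorted list = the running-min result
theorem pvSorted_head (x : Int) (t : List Int) (m : Int) (s : List Int)
    (hs : PySem.List.sorted (x :: t) (fun v => v) false = m :: s) :
    m = t.foldl min x := by
  have hmem : m ∈ x :: t := by
    have : m ∈ PySem.List.sorted (x :: t) (fun v => v) false := by simp [hs]
    simpa [PySem.List.mem_sorted] using this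
  have hmin_mem : t.foldl min x ∈ x :: t := pvFoldlMin_mem t x
  have h1 : m ≤ t.foldl min x := PySem.List.key_head_sorted_le _ _ hs _ hmin_mem
  have h2 : t.foldl min x ≤ m := pvFoldlMin_le t x m hmem
  omega

-- last of the sorted list = the running-max result
theorem pvSorted_last (x : Int) (t : List Int) (m : Int) (s : List Int)
    (hs : PySem.List.sorted (x :: t) (fun v => v) false = m :: s) :
    (m :: s)[(m :: s).length - 1]'(by simp) = t.foldl max x := by
  have hiff : ∀ z : Int, z ∈ m :: s ↔ z ∈ x :: t := by
    intro z; rw [← hs]; exact PySem.List.mem_sorted _ _ _ _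
  have hlast_mem : (m :: s)[(m :: s).length - 1]'(by simp) ∈ x :: t :=
    (hiff _).1 (List.getElem_mem _)
  have h1 : (m :: s)[(m :: s).length - 1]'(by simp) ≤ t.foldl max x :=
    pvFoldlMax_ge t x _ hlast_mem
  have hmax_in : t.foldl max x ∈ m :: s := by
    rw [← hs]; simpa [PySem.List.mem_sorted] using pvFoldlMax_mem t x
  obtain ⟨i, hi, hival⟩ := List.mem_iff_getElem.1 hmax_in
  have hmono : (m :: s)[i]'hi ≤ (m :: s)[(m :: s).length - 1]'(by simp) := by
    have := PySem.List.sorted_id_getElem_mono (xs := x :: t) (p := i)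
      (q := (m :: s).length - 1) (by omega) (by rw [hs]; simp)
    simpa [hs] using this
  have h2 : t.foldl max x ≤ (m :: s)[(m :: s).length - 1]'(by simp) :=
    hival ▸ hmono
  exact le_antisymm h1 h2

-- ===== VERDICT (by name: the statement is the Claim_ definition above) =====
theorem estimate_total_experience_spec : Claim_equal_estimate_total_experience := by
  intro exps _
  show estimate_total_experience exps = estimate_total_experience_alt exps
  unfold estimate_total_experience estimate_total_experience_alt
  simp only [pvBVals_eq]
  rw [pvA_years]
  simp only [List.nil_append]
  set l := (exps.map pvVals).flatMap (fun v => v.filterMap pvToInt?) with hl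
  cases hcase : l with
  | nil => simp [PySem.List.sorted_eq_nil_iff]
  | cons x t =>
      have hne : PySem.List.sorted (x :: t) (fun v : Int => v) false ≠ [] := by
        simp [PySem.List.sorted_eq_nil_iff]
      cases hs : PySem.List.sorted (x :: t) (fun v : Int => v) false with
      | nil => exact absurd hs hne
      | cons m s =>
          rw [PySem.List.max?_id_cons, PySem.List.min?_id_cons]
          have hhead := pvSorted_head x t m s hs
          have hlast := pvSorted_last x t m s hs
          simp only [hs, PySem.List.pyGet?, PySem.List.pyIdx?] at *
          simp [← hhead, ← hlast]
          rfl
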